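-- pv_equiv track=rewrite | github.com/MindlessTruffle/FunnyFrontend-Discord-Bot. | backend.py | all_capitalizations
-- ===== SOURCE A (Python) =====
-- def all_capitalizations(word):
--     if not word:
--         return ['']
--     first = word[0]
--     rest = word[1:]
--     lower_first = [first.lower() + tail for tail in all_capitalizations(rest)]
--     upper_first = [first.upper() + tail for tail in all_capitalizations(rest)]
--     return lower_first + upper_first
-- ===== SOURCE B (Python) =====
-- def all_capitalizations(word):
--     results = ['']
--     for c in word:
--         results = [p + v for p in results for v in (c.lower(), c.upper())]
--     return results
-- ===== Notes on version B (the rewrite author's own statement) =====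
-- stated objective: alternative
-- what changed: Replaced the doubly-branching recursion (which recomputes the suffix result twice per character) with a single left-to-right fold that extends each accumulated prefix by the lower and upper variant of the current character.
import Mathlib
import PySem

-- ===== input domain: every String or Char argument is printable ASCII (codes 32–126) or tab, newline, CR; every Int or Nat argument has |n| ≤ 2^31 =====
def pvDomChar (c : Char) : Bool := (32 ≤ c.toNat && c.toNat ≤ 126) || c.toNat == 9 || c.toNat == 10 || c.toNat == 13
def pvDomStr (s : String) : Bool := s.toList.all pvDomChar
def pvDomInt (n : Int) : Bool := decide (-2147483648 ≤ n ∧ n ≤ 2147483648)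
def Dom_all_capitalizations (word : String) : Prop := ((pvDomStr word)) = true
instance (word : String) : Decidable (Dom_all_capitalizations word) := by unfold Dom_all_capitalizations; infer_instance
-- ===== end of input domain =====

-- B replaces A's doubly-branching recursion by a single left-to-right fold over the
-- characters; A recomputes the suffix result twice per character, the fold avoids that.

-- ===== PORT A =====
-- A's recursion on word = first :: rest, carried out on the character list
-- (strings are handled as their character lists; String.ofList rebuilds the results).
def pvAGo : List Char → List (List Char)
  | [] => [[]]
  | first :: rest =>
    let lower_first := (pvAGo rest).map (fun tail => PySem.Chars.lowerChar first :: tail)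
    let upper_first := (pvAGo rest).map (fun tail => PySem.Chars.upperChar first :: tail)
    lower_first ++ upper_first

def all_capitalizations (word : String) : List String :=
  (pvAGo word.toList).map String.ofList

-- ===== PORT B =====
-- one fold step: extend every accumulated prefix by c.lower() and c.upper()
def pvBStep (acc : List (List Char)) (c : Char) : List (List Char) :=
  acc.flatMap (fun p => [p ++ [PySem.Chars.lowerChar c], p ++ [PySem.Chars.upperChar c]])

def all_capitalizations_alt (word : String) : List String :=
  (word.toList.foldl pvBStep [[]]).map String.ofList

-- ===== PRECONDITION & SPEC =====
def Spec_all_capitalizations (word : String) (out : List String) : Prop := out = all_capitalizations_alt word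
instance (word : String) (out : List String) : Decidable (Spec_all_capitalizations word out) := by unfold Spec_all_capitalizations; infer_instance

-- ===== CLAIM (what is proved, stated in full; the proofs are below) =====
def Claim_equal_all_capitalizations : Prop := ∀ (word : String), Dom_all_capitalizations word → Spec_all_capitalizations word (all_capitalizations word)

-- ===== LEMMAS AND PROOFS =====

-- the fold, started from any set of prefixes, appends every suffix capitalization
lemma pvFold_char (cs : List Char) : ∀ (acc : List (List Char)),
    cs.foldl pvBStep acc = acc.flatMap (fun p => (pvAGo cs).map (fun t => p ++ t)) := by
  induction cs with
  | nil => intro acc; simp [pvAGo]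
  | cons c cs ih =>
    intro acc
    simp only [List.foldl_cons, ih, pvAGo, pvBStep, List.flatMap_assoc]
    refine List.flatMap_congr (fun p _ => ?_)
    simp [List.map_map, Function.comp_def, List.append_assoc]

-- ===== VERDICT (by name: the statement is the Claim_ definition above) =====
theorem all_capitalizations_spec : Claim_equal_all_capitalizations := by
  intro word _
  unfold Spec_all_capitalizations all_capitalizations all_capitalizations_alt
  rw [pvFold_char]
  simp
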